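-- pv_equiv track=rewrite | github.com/jby0107/Homework | exercise.py | haha
-- ===== SOURCE A (Python) =====
-- from copy import deepcopy
--
-- def haha(image):
--     # perform a deep copy, so we won't mess up with the image passed into this function
--     image = deepcopy(image)
--     # -------------- do whatever you want to "image" -----------
--     a=[]
--     for i in range(10):
--         for i in range(64):
--             a.append(i)
--     for i in range(1,len(image)):
--         image[i]=a[-i:]+a[:-i]
--     # ----------------------------------------------------------
--     return image
-- ===== SOURCE B (Python) =====
-- def haha(image):
--     # Closed form: A's row i is the base pattern [j % 64 for j in range(640)]
--     # rotated right by i (the slice rotation saturates once i exceeds 640),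
--     # so element j of row i is (j - min(i, 640)) % 64. Row 0 stays a copy.
--     if not image:
--         return []
--     return [list(image[0])] + [
--         [(j - min(i, 640)) % 64 for j in range(640)]
--         for i in range(1, len(image))
--     ]
-- ===== Notes on version B (the rewrite author's own statement) =====
-- stated objective: alternative
-- what changed: B replaces A's build-a-640-list-then-slice-rotate-per-row with a per-element closed form: row i element j is (j - min(i,640)) % 64 (the slice rotation saturates at 640), computed directly from a range comprehension.
import Mathlib
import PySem

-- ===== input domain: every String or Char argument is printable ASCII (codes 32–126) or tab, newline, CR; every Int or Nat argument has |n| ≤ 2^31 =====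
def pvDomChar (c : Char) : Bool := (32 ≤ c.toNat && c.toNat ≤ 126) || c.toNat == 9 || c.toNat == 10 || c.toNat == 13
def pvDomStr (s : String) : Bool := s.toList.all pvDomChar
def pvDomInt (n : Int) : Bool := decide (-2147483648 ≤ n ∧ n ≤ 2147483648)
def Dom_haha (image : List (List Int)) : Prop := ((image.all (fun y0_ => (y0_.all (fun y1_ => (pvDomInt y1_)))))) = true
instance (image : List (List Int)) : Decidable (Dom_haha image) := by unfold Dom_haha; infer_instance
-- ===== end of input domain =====

-- B replaces A's build-a-640-list-then-slice-rotate-per-row with a per-element closed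
-- form (row i, element j = (j - min(i,640)) % 64); same return value, alternative algorithm.
-- (A's deepcopy only affects aliasing, never the return value; Lean lists are immutable.)

-- ===== PORT A =====
-- a = [] ; for i in range(10): for i in range(64): a.append(i)
def hahaBase : List Int :=
  (PySem.List.pyRange 0 10 1).foldl
    (fun a _ => (PySem.List.pyRange 0 64 1).foldl (fun a i => a ++ [i]) a) []

-- for i in range(1, len(image)): image[i] = a[-i:] + a[:-i]   (i always in range)
def haha (image : List (List Int)) : List (List Int) :=
  (PySem.List.pyRange 1 (image.length : Int) 1).foldl
    (fun img i =>
      PySem.List.pySetD img i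
        (PySem.List.slice hahaBase (some (-i)) none ++
         PySem.List.slice hahaBase none (some (-i))))
    image

-- ===== PORT B =====
def haha_alt (image : List (List Int)) : List (List Int) :=
  match image with
  | [] => []
  | r0 :: _ =>
    [r0] ++ (PySem.List.pyRange 1 (image.length : Int) 1).map
      (fun i => (PySem.List.pyRange 0 640 1).map
        (fun j => PySem.Int.mod (j - min i 640) 64))

-- ===== PRECONDITION & SPEC =====
def Spec_haha (image : List (List Int)) (out : List (List Int)) : Prop := out = haha_alt image
instance (image : List (List Int)) (out : List (List Int)) : Decidable (Spec_haha image out) := by unfold Spec_haha; infer_instance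

-- ===== CLAIM (what is proved, stated in full; the proofs are below) =====
def Claim_equal_haha : Prop := ∀ (image : List (List Int)), Dom_haha image → Spec_haha image (haha image)

-- ===== LEMMAS AND PROOFS =====

-- A's concrete base list is [j % 64 for j in range(640)]
set_option maxRecDepth 4096 in
lemma hahaBase_eq : hahaBase = (List.range 640).map (fun m => ((m % 64 : Nat) : Int)) := by
  decide

lemma length_hahaBase : hahaBase.length = 640 := by rw [hahaBase_eq]; simp

-- the rotated base row, for any rotation amount 1 ≤ k ≤ 640, in closed form
lemma rot_eq (k : Nat) (hk1 : 1 ≤ k) (hk2 : k ≤ 640) :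
    hahaBase.drop (640 - k) ++ hahaBase.take (640 - k)
      = (PySem.List.pyRange 0 640 1).map (fun j => PySem.Int.mod (j - (k : Int)) 64) := by
  rw [hahaBase_eq, PySem.List.pyRange_one]
  apply List.ext_getElem
  · simp
  · intro n h1 h2
    simp only [List.getElem_append, List.getElem_map, List.getElem_drop, List.getElem_take,
      List.getElem_range, List.length_drop, List.length_map, List.length_range]
    rw [PySem.Int.mod_eq_emod_of_pos (by norm_num)]
    split_ifs with h
    · push_cast; omega
    · push_cast; omega

-- A's slice rotation a[-i:] + a[:-i] saturates at 640 and equals B's closed-form row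
lemma row_eq (i : Int) (hi : 1 ≤ i) :
    PySem.List.slice hahaBase (some (-i)) none ++ PySem.List.slice hahaBase none (some (-i))
      = (PySem.List.pyRange 0 640 1).map (fun j => PySem.Int.mod (j - min i 640) 64) := by
  obtain ⟨m, rfl⟩ : ∃ m : Nat, i = (m : Int) := ⟨i.toNat, (Int.toNat_of_nonneg (by omega)).symm⟩
  have hm1 : 1 ≤ m := by exact_mod_cast hi
  rw [PySem.List.slice_from_neg_natCast _ _ (by omega),
      PySem.List.slice_to_neg_natCast _ _ (by omega), length_hahaBase]
  by_cases hm : m ≤ 640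
  · have hmin : min ((m : Nat) : Int) 640 = ((m : Nat) : Int) := by omega
    rw [hmin, rot_eq m hm1 hm]
  · have hz : 640 - m = 0 := by omega
    have hmin : min ((m : Nat) : Int) 640 = ((640 : Nat) : Int) := by push_cast; omega
    rw [hz, hmin]
    simpa using rot_eq 640 (by norm_num) (by norm_num)

-- setting positions ≥ 1 never touches the head
lemma foldl_set_cons {α : Type} (l : List Nat) (h : α) (t : List α) (g : Nat → α) :
    l.foldl (fun u k => u.set (k+1) (g k)) (h :: t)
      = h :: l.foldl (fun u k => u.set k (g k)) t := by
  induction l generalizing t with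
  | nil => rfl
  | cons x xs ih => simp [List.foldl_cons, List.set_cons_succ, ih]

-- setting every position of t in order replaces t by the map
lemma foldl_set_all {α : Type} (t : List α) (g : Nat → α) :
    (List.range t.length).foldl (fun u k => u.set k (g k)) t
      = (List.range t.length).map g := by
  induction t generalizing g with
  | nil => rfl
  | cons x t ih =>
    rw [List.length_cons, List.range_succ_eq_map]
    simp only [List.foldl_cons, List.set]
    rw [List.foldl_map]
    calc (List.range t.length).foldl (fun u k => u.set (Nat.succ k) (g (Nat.succ k))) (g 0 :: t)
        = g 0 :: (List.range t.length).foldl (fun u k => u.set k (g (Nat.succ k))) t :=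
          foldl_set_cons _ _ _ _
      _ = g 0 :: (List.range t.length).map (fun k => g (Nat.succ k)) := by rw [ih]
      _ = _ := by simp

-- range(1, n+1) as a mapped List.range
lemma pyRange_shift (n : Nat) :
    PySem.List.pyRange 1 ((n + 1 : Nat) : Int) 1
      = (List.range n).map (fun k => ((k + 1 : Nat) : Int)) := by
  rw [PySem.List.pyRange_one]
  have h : (((n + 1 : Nat) : Int) - 1).toNat = n := by push_cast; omega
  rw [h]
  apply List.map_congr_left
  intro k _
  push_cast; ring

-- ===== VERDICT (by name: the statement is the Claim_ definition above) =====
set_option maxRecDepth 8192 in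
theorem haha_spec : Claim_equal_haha := by
  intro image _
  unfold Spec_haha haha haha_alt
  cases image with
  | nil => simp [PySem.List.pyRange_one_eq_nil]
  | cons r0 t =>
    rw [List.length_cons, pyRange_shift, List.foldl_map, List.map_map]
    simp only [PySem.List.pySetD_natCast]
    rw [foldl_set_cons, foldl_set_all]
    simp only [List.singleton_append]
    refine congrArg (List.cons r0) ?_
    apply List.map_congr_left
    intro k _
    exact row_eq _ (by exact_mod_cast Nat.le_add_left 1 k)
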